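-- pv_equiv track=rewrite | github.com/Blodangan/sutord | sutord.py | rank_to_emojis
-- ===== SOURCE A (Python) =====
-- def rank_to_emojis(rank):
--     digits = [':zero:', ':one:', ':two:', ':three:', ':four:', ':five:', ':six:', ':seven:', ':eight:', ':nine:']
--
--     if rank < 1:
--         return ':interrobang:'
--     elif rank == 1:
--         return ':first_place:'
--     elif rank == 2:
--         return ':second_place:'
--     elif rank == 3:
--         return ':third_place:'
--     else:
--         return ''.join(digits[i] for i in map(int, str(rank)))
-- ===== SOURCE B (Python) =====
-- def rank_to_emojis(rank):
--     if rank < 1: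
--         return ':interrobang:'
--     if rank == 1:
--         return ':first_place:'
--     if rank == 2:
--         return ':second_place:'
--     if rank == 3:
--         return ':third_place:'
--     digits = [':zero:', ':one:', ':two:', ':three:', ':four:', ':five:', ':six:', ':seven:', ':eight:', ':nine:']
--     parts = []
--     n = rank
--     while n > 0:
--         n, d = divmod(n, 10)
--         parts.append(digits[d])
--     return ''.join(reversed(parts))
-- ===== Notes on version B (the rewrite author's own statement) =====
-- stated objective: alternative
-- what changed: B extracts digits arithmetically with divmod (least-significant first, then reversed) instead of A's string conversion str(rank) with per-character int() and list indexing.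
import Mathlib
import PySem

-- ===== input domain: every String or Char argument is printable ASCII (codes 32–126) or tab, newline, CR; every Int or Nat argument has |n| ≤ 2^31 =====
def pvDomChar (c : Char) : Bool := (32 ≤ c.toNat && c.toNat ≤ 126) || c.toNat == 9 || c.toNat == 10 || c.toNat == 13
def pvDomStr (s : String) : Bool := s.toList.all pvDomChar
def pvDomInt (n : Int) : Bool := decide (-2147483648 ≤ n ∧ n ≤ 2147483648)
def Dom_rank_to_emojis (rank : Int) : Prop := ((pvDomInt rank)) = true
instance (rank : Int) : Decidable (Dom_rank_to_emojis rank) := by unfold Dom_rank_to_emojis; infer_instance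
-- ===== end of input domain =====

-- B extracts digits arithmetically with divmod instead of A's str(rank)/int(char)/index pipeline; same cost, different decomposition.

-- ===== PORT A =====
def pvDigits : List String :=
  [":zero:", ":one:", ":two:", ":three:", ":four:", ":five:", ":six:", ":seven:", ":eight:", ":nine:"]

-- int(c) on a single char: PySem.Int.ofChars? [c]; for rank ≥ 4 every char of str(rank) is a
-- decimal digit, so ofChars? is some and the .getD 0 default is never used (exact on this path);
-- likewise the index is then 0‥9 so pyGetD's default "" is never used (Python never raises here).
def rank_to_emojis (rank : Int) : String :=
  if rank < 1 then ":interrobang:"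
  else if rank = 1 then ":first_place:"
  else if rank = 2 then ":second_place:"
  else if rank = 3 then ":third_place:"
  else PySem.Str.join "" ((PySem.Int.toChars rank).map
    (fun c => PySem.List.pyGetD pvDigits ((PySem.Int.ofChars? [c]).getD 0) ""))

-- ===== PORT B =====
def pvDigitsB : List String :=
  [":zero:", ":one:", ":two:", ":three:", ":four:", ":five:", ":six:", ":seven:", ":eight:", ":nine:"]

-- the while-loop of Source B: n, d = divmod(n, 10); parts.append(digits[d]); least-significant first
def pvBLoop : Nat → List String
  | 0 => []
  | n + 1 =>
    PySem.List.pyGetD pvDigitsB (((n + 1) % 10 : Nat) : Int) "" :: pvBLoop ((n + 1) / 10)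
decreasing_by exact Nat.div_lt_self (Nat.succ_pos n) (by omega)

def rank_to_emojis_alt (rank : Int) : String :=
  if rank < 1 then ":interrobang:"
  else if rank = 1 then ":first_place:"
  else if rank = 2 then ":second_place:"
  else if rank = 3 then ":third_place:"
  else PySem.Str.join "" (pvBLoop rank.toNat).reverse

-- ===== PRECONDITION & SPEC =====
def Spec_rank_to_emojis (rank : Int) (out : String) : Prop := out = rank_to_emojis_alt rank
instance (rank : Int) (out : String) : Decidable (Spec_rank_to_emojis rank out) := by unfold Spec_rank_to_emojis; infer_instance

-- ===== CLAIM (what is proved, stated in full; the proofs are below) =====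
def Claim_equal_rank_to_emojis : Prop := ∀ (rank : Int), Dom_rank_to_emojis rank → Spec_rank_to_emojis rank (rank_to_emojis rank)

-- ===== LEMMAS AND PROOFS =====

-- the decimal digit characters of n, most significant first (a clean recurrence for Nat.toDigits)
def pvMyDigits (n : Nat) : List Char :=
  if h : n < 10 then [Nat.digitChar n]
  else pvMyDigits (n / 10) ++ [Nat.digitChar (n % 10)]
decreasing_by exact Nat.div_lt_self (by omega) (by omega)

theorem pvToDigitsCore_eq (f : Nat) : ∀ n acc, n < f →
    Nat.toDigitsCore 10 f n acc = pvMyDigits n ++ acc := by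
  induction f with
  | zero => intro n acc _h; omega

  | succ f ih =>
    intro n acc h
    rw [Nat.toDigitsCore]
    by_cases h10 : n / 10 = 0
    · have hn : n < 10 := by omega
      rw [if_pos h10, pvMyDigits, dif_pos hn, Nat.mod_eq_of_lt hn]
      simp
    · have hn : ¬ n < 10 := by omega
      have hlt : n / 10 < f := by
        have := Nat.div_lt_self (show 0 < n by omega) (show 1 < 10 by omega)
        omega
      rw [if_neg h10, ih (n / 10) _ hlt]
      conv_rhs => rw [pvMyDigits]
      rw [dif_neg hn]
      simp

theorem pvToDigits_eq (n : Nat) : Nat.toDigits 10 n = pvMyDigits n := by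
  have := pvToDigitsCore_eq (n + 1) n [] (by omega)
  simpa [Nat.toDigits] using this

theorem pvDigitStep (d : Nat) (hd : d < 10) :
    PySem.List.pyGetD pvDigits ((PySem.Int.ofChars? [Nat.digitChar d]).getD 0) "" =
    PySem.List.pyGetD pvDigitsB ((d : Nat) : Int) "" := by
  interval_cases d <;> decide

theorem pvMapEqLoop (n : Nat) (hn : 0 < n) :
    (pvMyDigits n).map
      (fun c => PySem.List.pyGetD pvDigits ((PySem.Int.ofChars? [c]).getD 0) "") =
    (pvBLoop n).reverse := by
  induction n using Nat.strong_induction_on with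
  | _ n ih =>
    match n, hn with
    | n + 1, _ =>
      rw [pvBLoop]
      by_cases h10 : n + 1 < 10
      · rw [pvMyDigits, dif_pos h10]
        have hq : (n + 1) / 10 = 0 := Nat.div_eq_of_lt h10
        rw [hq, pvBLoop]
        simp [pvDigitStep (n + 1) h10, Nat.mod_eq_of_lt h10]
      · rw [pvMyDigits, dif_neg h10]
        have hq : 0 < (n + 1) / 10 := Nat.div_pos (by omega) (by omega)
        have hlt : (n + 1) / 10 < n + 1 := Nat.div_lt_self (by omega) (by omega)
        rw [List.map_append, ih _ hlt hq]
        simp [pvDigitStep ((n + 1) % 10) (Nat.mod_lt _ (by omega))]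

-- ===== VERDICT (by name: the statement is the Claim_ definition above) =====
theorem rank_to_emojis_spec : Claim_equal_rank_to_emojis := by
  intro rank _
  unfold Spec_rank_to_emojis rank_to_emojis rank_to_emojis_alt
  by_cases h1 : rank < 1
  · simp [h1]
  by_cases h2 : rank = 1
  · simp [h2]
  by_cases h3 : rank = 2
  · simp [h2, h3]
  by_cases h4 : rank = 3
  · simp [h3, h4]
  have hge : 4 ≤ rank := by omega
  rw [if_neg h1, if_neg h2, if_neg h3, if_neg h4,
      if_neg h1, if_neg h2, if_neg h3, if_neg h4]
  have hneg : ¬ rank < 0 := by omega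
  have htc : PySem.Int.toChars rank = Nat.toDigits 10 rank.toNat := by
    simp [PySem.Int.toChars, hneg]
  have hpos : 0 < rank.toNat := by omega
  rw [htc, pvToDigits_eq, pvMapEqLoop rank.toNat hpos]
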